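-- pv_equiv track=rewrite | github.com/nikpopesku/leetcode | python/1300-1399/1314_matrix_block_sum.py | solveRow
-- ===== SOURCE A (Python) =====
-- def solveRow(row, k):
--     '''
--     O(n)
--     Where n is the number of elements in the row
--     '''
--     n = len(row)
--     k = min(k, n)
--     newRow = []
--     right = k
--     left = 0
--     total = sum(row[0: right + 1])
--     newRow.append(total)
--
--     for index in range(1, n):
--         if index > k:
--             total -= row[left]
--             left += 1
--
--         if index < n - k:
--             right += 1
--             total += row[right]
--         newRow.append(total)
--
--     return newRow
-- ===== SOURCE B (Python) =====
-- def solveRow(row, k):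
--     n = len(row)
--     k = min(k, n)
--     prefix = [0]
--     t = 0
--     for x in row:
--         t += x
--         prefix.append(t)
--     return [prefix[min(n, i + k + 1)] - prefix[max(0, i - k)] for i in range(n)]
-- ===== Notes on version B (the rewrite author's own statement) =====
-- stated objective: simpler
-- what changed: Replaces the stateful incremental sweep (running total with left/right pointers updated under two branch conditions) by a build-once prefix-sum table followed by a pure per-index query P[min(n,i+k+1)]-P[max(0,i-k)].
-- intended difference: On the empty row A unconditionally appends the pre-loop total and returns [0]; B returns [], the intended one-sum-per-position result. — e.g. on solveRow([], 0): A returns [0], B returns []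
-- outside the precondition, e.g. on solveRow([1, 2, 3], -1): A returns [0, 0, 0], B returns [-1, -2, -3]
import Mathlib
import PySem

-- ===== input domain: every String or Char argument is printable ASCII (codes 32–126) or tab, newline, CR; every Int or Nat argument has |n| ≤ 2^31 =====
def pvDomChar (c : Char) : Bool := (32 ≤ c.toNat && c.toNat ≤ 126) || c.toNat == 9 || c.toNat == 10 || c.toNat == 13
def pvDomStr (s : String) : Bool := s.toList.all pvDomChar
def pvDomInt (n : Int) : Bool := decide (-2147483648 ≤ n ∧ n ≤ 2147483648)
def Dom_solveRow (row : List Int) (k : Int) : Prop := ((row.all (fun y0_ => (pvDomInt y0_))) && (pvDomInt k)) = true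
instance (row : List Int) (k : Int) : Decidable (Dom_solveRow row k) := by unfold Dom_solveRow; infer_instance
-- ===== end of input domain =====

-- B replaces A's incremental running-total sweep by a prefix-sum table plus per-index
-- queries (objective: simpler); on the empty row B returns the intended [] where A returns [0].

-- ===== PORT A =====
-- loop body of A's 'for index in range(1, n)': state is (total, left, right, newRow)
def solveRowStep (row : List Int) (n k : Int)
    (s : Int × Int × Int × List Int) (index : Int) : Int × Int × Int × List Int :=
  let total := s.1
  let left := s.2.1
  let right := s.2.2.1
  let newRow := s.2.2.2
  let tl : Int × Int :=
    if index > k then (total - PySem.List.pyGetD row left 0, left + 1) else (total, left)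
  let tr : Int × Int :=
    if index < n - k then (tl.1 + PySem.List.pyGetD row (right + 1) 0, right + 1) else (tl.1, right)
  (tr.1, tl.2, tr.2, newRow ++ [tr.1])

def solveRow (row : List Int) (k : Int) : List Int :=
  let n : Int := row.length
  let k := min k n
  let right := k
  let left : Int := 0
  let total := (PySem.List.slice row (some 0) (some (right + 1))).sum
  let s := (PySem.List.pyRange 1 n 1).foldl (solveRowStep row n k) (total, left, right, [total])
  s.2.2.2

-- ===== PORT B =====
def solveRow_alt (row : List Int) (k : Int) : List Int :=
  let n : Int := row.length
  let k := min k n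
  let pt := row.foldl (fun (s : List Int × Int) x => (s.1 ++ [s.2 + x], s.2 + x)) ([0], 0)
  let pfx := pt.1
  (PySem.List.pyRange 0 n 1).map (fun i =>
    PySem.List.pyGetD pfx (min n (i + k + 1)) 0 - PySem.List.pyGetD pfx (max 0 (i - k)) 0)

-- ===== PRECONDITION & SPEC =====
-- Pre_ excludes negative k, where A's returned values come from accidental negative-slice
-- bounds and negative-index wraparound (e.g. solveRow([1,2,3],-1) == [0,0,0]).
def Pre_solveRow (row : List Int) (k : Int) : Prop := 0 ≤ k
instance (row : List Int) (k : Int) : Decidable (Pre_solveRow row k) := by unfold Pre_solveRow; infer_instance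
def pvWitness_solveRow : List Int × Int := ([1, 2, 3], 1)

-- On the empty row A unconditionally appends the pre-loop total and returns [0];
-- B returns [], the intended one-sum-per-position result.
def D_solveRow (row : List Int) (k : Int) : Prop := row = []
instance (row : List Int) (k : Int) : Decidable (D_solveRow row k) := by unfold D_solveRow; infer_instance
def Spec_solveRow (row : List Int) (k : Int) (out : List Int) : Prop := ¬ D_solveRow row k → out = solveRow_alt row k
instance (row : List Int) (k : Int) (out : List Int) : Decidable (Spec_solveRow row k out) := by unfold Spec_solveRow; infer_instance
def pvDiffWitness_solveRow : List Int × Int := ([], 0)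
def pvDiffWitnessOut_solveRow : (List Int) × (List Int) := ([0], [])

-- ===== CLAIM (what is proved, stated in full; the proofs are below) =====
def Claim_unchanged_solveRow : Prop := ∀ (row : List Int) (k : Int), Dom_solveRow row k → Pre_solveRow row k → Spec_solveRow row k (solveRow row k)
def Claim_changed_solveRow : Prop := Dom_solveRow (pvDiffWitness_solveRow.1) (pvDiffWitness_solveRow.2) ∧ Pre_solveRow (pvDiffWitness_solveRow.1) (pvDiffWitness_solveRow.2) ∧ D_solveRow (pvDiffWitness_solveRow.1) (pvDiffWitness_solveRow.2) ∧ solveRow (pvDiffWitness_solveRow.1) (pvDiffWitness_solveRow.2) = pvDiffWitnessOut_solveRow.1 ∧ solveRow_alt (pvDiffWitness_solveRow.1) (pvDiffWitness_solveRow.2) = pvDiffWitnessOut_solveRow.2 ∧ pvDiffWitnessOut_solveRow.1 ≠ pvDiffWitnessOut_solveRow.2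
def Claim_exact_solveRow : Prop := ∀ (row : List Int) (k : Int), Dom_solveRow row k → Pre_solveRow row k → D_solveRow row k → solveRow row k ≠ solveRow_alt row k

-- ===== LEMMAS AND PROOFS =====

def pvP (row : List Int) (j : Int) : Int := ((row.take j.toNat).map id).sum

def pvS (row : List Int) (k : Int) (i : Int) : Int :=
  pvP row (min (row.length : Int) (i + k + 1)) - pvP row (max 0 (i - k))

lemma prefix_fold (l : List Int) (acc : List Int) (t : Int) :
    l.foldl (fun (s : List Int × Int) x => (s.1 ++ [s.2 + x], s.2 + x)) (acc, t)
      = (acc ++ (List.range l.length).map (fun j => t + (l.take (j+1)).sum), t + l.sum) := by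
  induction l generalizing acc t with
  | nil => simp
  | cons x xs ih =>
    simp only [List.foldl_cons, ih (acc ++ [t + x]) (t + x), List.length_cons,
      List.range_succ_eq_map, List.map_cons, List.map_map]
    simp [Prod.ext_iff, List.append_assoc, Function.comp_def, add_assoc]


lemma pvP_def (row : List Int) (j : Int) : pvP row j = (row.take j.toNat).sum := by simp [pvP]


lemma prefix_get (row : List Int) (j : Int) (h0 : 0 ≤ j) (hn : j ≤ (row.length : Int)) :
    PySem.List.pyGetD
      ((row.foldl (fun (s : List Int × Int) x => (s.1 ++ [s.2 + x], s.2 + x)) ([0], 0)).1) j 0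
      = pvP row j := by
  rw [prefix_fold]
  obtain ⟨m, rfl⟩ : ∃ m : Nat, j = (m : Int) := ⟨j.toNat, by omega⟩
  rw [PySem.List.pyGetD_natCast]
  have hm : m ≤ row.length := by exact_mod_cast hn
  rcases Nat.eq_zero_or_pos m with h | h
  · subst h; simp [pvP_def]
  · obtain ⟨p, rfl⟩ : ∃ p, m = p + 1 := ⟨m - 1, by omega⟩
    have hp : p < row.length := by omega
    simp only [List.getD]
    rw [List.getElem?_append_right (by simp)]
    simp [List.getElem?_map, List.getElem?_range, hp, pvP_def, zero_add]


lemma take_sum_congr (row : List Int) (a b : Nat) (ha : row.length ≤ a) (hb : row.length ≤ b) :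
    (row.take a).sum = (row.take b).sum := by
  rw [List.take_of_length_le ha, List.take_of_length_le hb]


lemma pvP_succ (row : List Int) (j : Int) (h0 : 0 ≤ j) (hn : j < (row.length : Int)) :
    pvP row (j + 1) = pvP row j + PySem.List.pyGetD row j 0 := by
  have hj : j.toNat < row.length := by omega
  rw [PySem.List.pyGetD_eq_getElem row 0 h0 hn]
  have h1 : (j + 1).toNat = j.toNat + 1 := by omega
  rw [pvP_def, pvP_def, h1, List.take_succ]
  simp [hj]


lemma init_total (row : List Int) (k : Int) (hk : 0 ≤ k) :
    (PySem.List.slice row (some 0) (some (k + 1))).sum = pvS row k 0 := by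
  rw [PySem.List.slice_zero_start, PySem.List.slice_to row (by omega)]
  have h2 : max 0 (0 - k) = 0 := by omega
  simp only [pvS, h2, pvP_def]
  simp only [Int.toNat_zero, List.take_zero, List.sum_nil, sub_zero]
  by_cases h : k + 1 ≤ (row.length : Int)
  · have : (min (row.length : Int) (0 + k + 1)).toNat = (k + 1).toNat := by omega
    rw [this]
  · exact take_sum_congr row _ _ (by omega) (by omega)


lemma solveRow_alt_eq (row : List Int) (k : Int) (hk : 0 ≤ k) :
    solveRow_alt row k = (List.range row.length).map (fun j : Nat => pvS row (min k (row.length : Int)) (j : Int)) := by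
  unfold solveRow_alt
  simp only []
  rw [PySem.List.pyRange_one 0 (row.length : Int)]
  rw [List.map_map]
  have hn0 : (0 : Int) ≤ (row.length : Int) := by positivity
  have hrange : ((row.length : Int) - 0).toNat = row.length := by omega
  rw [hrange]
  apply List.map_congr_left
  intro j hj
  have hjn : j < row.length := List.mem_range.mp hj
  have hk' : 0 ≤ min k (row.length : Int) := by omega
  simp only [Function.comp_def, zero_add]
  rw [prefix_get row _ (by omega) (by omega), prefix_get row _ (by omega) (by omega)]
  rfl


lemma loop_inv (row : List Int) (k : Int) (hk : 0 ≤ k) (hkn : k ≤ (row.length : Int))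
    (m : Nat) (hm : (m : Int) ≤ (row.length : Int) - 1) :
    (PySem.List.pyRange 1 (1 + (m : Int)) 1).foldl (solveRowStep row (row.length : Int) k)
        (pvS row k 0, 0, k, [pvS row k 0])
      = (pvS row k (m : Int), max 0 ((m : Int) - k),
         k + min (m : Int) (max 0 ((row.length : Int) - k - 1)),
         (List.range (m+1)).map (fun j : Nat => pvS row k (j : Int))) := by
  induction m with
  | zero =>
    rw [PySem.List.pyRange_one_eq_nil (by omega)]
    have h1 : max 0 ((0:Int) - k) = 0 := by omega
    have h2 : min (0:Int) (max 0 ((row.length : Int) - k - 1)) = 0 := by omega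
    simp [h1, h2]
    omega
  | succ m ih =>
    have hm' : (m : Int) ≤ (row.length : Int) - 1 := by push_cast at hm ⊢; omega
    have hsplit : (1 + ((m+1 : Nat) : Int)) = (1 + (m : Int)) + 1 := by push_cast; ring
    rw [hsplit, PySem.List.pyRange_one_succ_right (by omega), List.foldl_append, ih hm']
    simp only [List.foldl_cons, List.foldl_nil]
    unfold solveRowStep
    simp only []
    set N : Int := (row.length : Int) with hN
    by_cases c1 : 1 + (m : Int) > k
    · by_cases c2 : 1 + (m : Int) < N - k
      · -- drop left, extend right
        have e1 : max 0 ((m:Int) - k) = (m:Int) - k := by omega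
        have e2 : min (m:Int) (max 0 (N - k - 1)) = (m:Int) := by omega
        have hs1 : pvS row k (m:Int) = pvP row ((m:Int) + k + 1) - pvP row ((m:Int) - k) := by
          unfold pvS
          have h3 : min N ((m:Int) + k + 1) = (m:Int) + k + 1 := by omega
          rw [e1, h3]
        have hs2 : pvS row k ((m:Int)+1) = pvP row ((m:Int) + k + 2) - pvP row ((m:Int) + 1 - k) := by
          unfold pvS
          have h3 : min N ((m:Int) + 1 + k + 1) = (m:Int) + k + 2 := by omega
          have h4 : max 0 ((m:Int) + 1 - k) = (m:Int) + 1 - k := by omega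
          rw [h3, h4]
        have hga : PySem.List.pyGetD row ((m:Int) - k) 0 = pvP row ((m:Int) + 1 - k) - pvP row ((m:Int) - k) := by
          have h5 : (m:Int) + 1 - k = ((m:Int) - k) + 1 := by ring
          rw [h5, pvP_succ row _ (by omega) (by omega)]; ring
        have hgb : PySem.List.pyGetD row (k + (m:Int) + 1) 0 = pvP row ((m:Int) + k + 2) - pvP row ((m:Int) + k + 1) := by
          have h5 : (m:Int) + k + 2 = (k + (m:Int) + 1) + 1 := by ring
          rw [h5, pvP_succ row _ (by omega) (by omega)]; ring
        rw [if_pos c1, if_pos c2]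
        simp only [e1, e2, Prod.mk.injEq]
        refine ⟨?_, by omega, by omega, ?_⟩
        · push_cast
          rw [hga, hgb, hs1, hs2]; ring
        · conv_rhs => rw [List.range_succ, List.map_append]
          simp only [List.map_cons, List.map_nil, List.append_cancel_left_eq, List.cons.injEq, and_true]
          push_cast
          rw [hga, hgb, hs1, hs2]; ring
      · -- drop left, right saturated
        have e1 : max 0 ((m:Int) - k) = (m:Int) - k := by omega
        have hs1 : pvS row k (m:Int) = pvP row N - pvP row ((m:Int) - k) := by
          unfold pvS
          have h3 : min N ((m:Int) + k + 1) = N := by omega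
          rw [e1, h3]
        have hs2 : pvS row k ((m:Int)+1) = pvP row N - pvP row ((m:Int) + 1 - k) := by
          unfold pvS
          have h3 : min N ((m:Int) + 1 + k + 1) = N := by omega
          have h4 : max 0 ((m:Int) + 1 - k) = (m:Int) + 1 - k := by omega
          rw [h3, h4]
        have hga : PySem.List.pyGetD row ((m:Int) - k) 0 = pvP row ((m:Int) + 1 - k) - pvP row ((m:Int) - k) := by
          have h5 : (m:Int) + 1 - k = ((m:Int) - k) + 1 := by ring
          rw [h5, pvP_succ row _ (by omega) (by omega)]; ring
        rw [if_pos c1, if_neg c2]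
        simp only [e1, Prod.mk.injEq]
        refine ⟨?_, by omega, by omega, ?_⟩
        · push_cast
          rw [hga, hs1, hs2]; ring
        · conv_rhs => rw [List.range_succ, List.map_append]
          simp only [List.map_cons, List.map_nil, List.append_cancel_left_eq, List.cons.injEq, and_true]
          push_cast
          rw [hga, hs1, hs2]; ring
    · by_cases c2 : 1 + (m : Int) < N - k
      swap
      · -- window is the whole row on both sides: nothing changes
        have e1 : max 0 ((m:Int) - k) = 0 := by omega
        have e1' : max 0 ((m:Int) + 1 - k) = 0 := by omega
        have e2 : max 0 (N - k - 1) ≤ (m:Int) := by omega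
        have hs12 : pvS row k ((m:Int)+1) = pvS row k (m:Int) := by
          unfold pvS
          have h3 : min N ((m:Int) + 1 + k + 1) = N := by omega
          have h4 : min N ((m:Int) + k + 1) = N := by omega
          rw [h3, h4, e1, e1']
        rw [if_neg c1, if_neg c2]
        simp only [Prod.mk.injEq]
        refine ⟨?_, by omega, by omega, ?_⟩
        · push_cast
          rw [hs12]
        · conv_rhs => rw [List.range_succ, List.map_append]
          simp only [List.map_cons, List.map_nil, List.append_cancel_left_eq, List.cons.injEq, and_true]
          push_cast
          rw [hs12]
      -- left still at 0, extend right
      have e1 : max 0 ((m:Int) - k) = 0 := by omega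
      have e1' : max 0 ((m:Int) + 1 - k) = 0 := by omega
      have e2 : min (m:Int) (max 0 (N - k - 1)) = (m:Int) := by omega
      have hs1 : pvS row k (m:Int) = pvP row ((m:Int) + k + 1) - pvP row 0 := by
        unfold pvS
        have h3 : min N ((m:Int) + k + 1) = (m:Int) + k + 1 := by omega
        rw [e1, h3]
      have hs2 : pvS row k ((m:Int)+1) = pvP row ((m:Int) + k + 2) - pvP row 0 := by
        unfold pvS
        have h3 : min N ((m:Int) + 1 + k + 1) = (m:Int) + k + 2 := by omega
        rw [h3, e1']
      have hgb : PySem.List.pyGetD row (k + (m:Int) + 1) 0 = pvP row ((m:Int) + k + 2) - pvP row ((m:Int) + k + 1) := by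
        have h5 : (m:Int) + k + 2 = (k + (m:Int) + 1) + 1 := by ring
        rw [h5, pvP_succ row _ (by omega) (by omega)]; ring
      rw [if_neg c1, if_pos c2]
      simp only [e1, e2, Prod.mk.injEq]
      refine ⟨?_, by omega, by omega, ?_⟩
      · push_cast
        rw [hgb, hs1, hs2]; ring
      · conv_rhs => rw [List.range_succ, List.map_append]
        simp only [List.map_cons, List.map_nil, List.append_cancel_left_eq, List.cons.injEq, and_true]
        push_cast
        rw [hgb, hs1, hs2]; ring


lemma solveRow_eq (row : List Int) (k : Int) (hk : 0 ≤ k) (hrow : row ≠ []) :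
    solveRow row k = (List.range row.length).map (fun j : Nat => pvS row (min k (row.length : Int)) (j : Int)) := by
  unfold solveRow
  simp only []
  have hn1 : 1 ≤ row.length := List.length_pos_iff.mpr hrow
  have hk' : 0 ≤ min k (row.length : Int) := by omega
  have hk'n : min k (row.length : Int) ≤ (row.length : Int) := by omega
  rw [init_total row _ hk']
  have h := loop_inv row (min k (row.length : Int)) hk' hk'n (row.length - 1) (by push_cast; omega)
  rw [show (1 + ((row.length - 1 : Nat) : Int)) = (row.length : Int) by push_cast; omega] at h
  rw [h]
  have h2 : row.length - 1 + 1 = row.length := by omega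
  rw [h2]

-- ===== VERDICT (by name: the statement is the Claim_ definition above) =====
theorem solveRow_spec : Claim_unchanged_solveRow := by
  intro row k _ hpre hD
  have hrow : row ≠ [] := by simpa [D_solveRow] using hD
  rw [solveRow_eq row k hpre hrow, solveRow_alt_eq row k hpre]

theorem solveRow_changed : Claim_changed_solveRow := by
  unfold Claim_changed_solveRow; decide

theorem solveRow_tight : Claim_exact_solveRow := by
  intro row k _ _ hD
  subst hD
  simp [solveRow, solveRow_alt, PySem.List.pyRange_one_eq_nil, PySem.List.pyRange_zero]
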